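-- pv_equiv track=rewrite | github.com/Tejasss22/Python | calender/calender.py | printing_dates
-- ===== SOURCE A (Python) =====
-- def printing_dates(h,month_value,year,j,month_value_dictionary):
--
-- 	d=1;
--
-- 	week_list = [' '];
-- 	month_week_string = [];
-- 	space_dictinary_for_one = {0: '5', 1: '6',2: '0',3: '1',4: '2',5: '3',6: '4'};
--
-- 	#function for calculating number of days in a month
-- 	def no_days_in_month(month_value,year):
--
--
-- 			if ((month_value_dictionary.get(month_value)) == '14'):
--
-- 				if(((year%4)==0 and (year%100)!=0) or ((year%400)==0)):
-- 					return 29;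
-- 				else:
-- 					return 28;
-- 			elif (month_value_dictionary.get(month_value)) in ['4','6','9','11']:
-- 				return 30;
-- 			else:
-- 				return 31;
--
-- 	last_date = no_days_in_month(month_value,year);
--
-- 	for x in  range(6):
--
-- 		for y in range(7):
--
-- 			if(d>last_date):
-- 				week_list.append('  ');
-- 			elif(d==1):
-- 				if((int(space_dictinary_for_one.get(h)))>(y)):
-- 					week_list.append('  ');
-- 				elif((int(space_dictinary_for_one.get(h)))==y):
-- 					week_list.append(' '+str(d));
-- 					d+=1;
-- 			else:
-- 				if(d<10):
-- 					week_list.append(' '+str(d));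
-- 					d+=1;
-- 				else:
-- 					week_list.append(str(d));
-- 					d+=1;
-- 		week_list.append(' ');
-- 		month_week_string.append((' '.join(week_list)));
-- 		week_list.clear();
-- 		week_list.append(' ');
-- 	return str(month_week_string[j-4]);
-- ===== SOURCE B (Python) =====
-- def printing_dates(h, month_value, year, j, month_value_dictionary):
--     # number of days in the month (same leap-year/month logic as the spec)
--     v = month_value_dictionary.get(month_value)
--     if v == '14':
--         last_date = 29 if ((year % 4 == 0 and year % 100 != 0) or year % 400 == 0) else 28
--     elif v in ['4', '6', '9', '11']:
--         last_date = 30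
--     else:
--         last_date = 31
--     # leading-blank offset for day 1: closed form of {0:'5',1:'6',2:'0',...,6:'4'}
--     offset = (h + 5) % 7
--     # one flat list of 42 cell tokens, then reshape into six rows of seven
--     cells = ['  '] * offset
--     cells += [(' ' + str(d)) if d < 10 else str(d) for d in range(1, last_date + 1)]
--     cells += ['  '] * (42 - len(cells))
--     rows = [' '.join([' '] + cells[i:i + 7] + [' ']) for i in range(0, 42, 7)]
--     return str(rows[j - 4])
-- ===== Notes on version B (the rewrite author's own statement) =====
-- stated objective: simpler
-- what changed: Replaces A's 6x7 nested-loop state machine (threading the running day counter and a mutable week list through 42 conditional appends) by computing the leading-blank offset in closed form ((h+5)%7) and the month length once, building one flat 42-token cell list by concatenation, and slicing it into six 7-cell rows.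
import Mathlib
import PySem

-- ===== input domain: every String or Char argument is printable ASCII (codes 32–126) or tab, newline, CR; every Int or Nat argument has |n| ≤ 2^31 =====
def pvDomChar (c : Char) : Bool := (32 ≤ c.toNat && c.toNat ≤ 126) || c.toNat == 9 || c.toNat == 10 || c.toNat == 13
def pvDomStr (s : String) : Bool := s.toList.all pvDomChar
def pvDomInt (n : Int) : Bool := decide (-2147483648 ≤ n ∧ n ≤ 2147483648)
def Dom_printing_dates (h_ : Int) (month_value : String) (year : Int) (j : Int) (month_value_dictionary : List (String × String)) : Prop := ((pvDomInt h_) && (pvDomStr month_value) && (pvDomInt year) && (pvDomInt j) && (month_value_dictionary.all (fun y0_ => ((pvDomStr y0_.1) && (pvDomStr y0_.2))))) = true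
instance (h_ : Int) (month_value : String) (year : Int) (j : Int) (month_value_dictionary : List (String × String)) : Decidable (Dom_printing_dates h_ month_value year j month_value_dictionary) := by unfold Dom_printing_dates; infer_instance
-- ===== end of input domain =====

-- B replaces A's 6×7 cell-by-cell state machine by building one flat 42-token list and slicing it
-- into rows (simpler decomposition). Pre_ excludes the inputs where A raises (h outside 0..6, j outside -2..9).


-- ===== PORT A =====

-- A's nested helper no_days_in_month (dict.get = first match in the association list)
def pvNoDaysA (month_value_dictionary : List (String × String)) (month_value : String) (year : Int) : Int :=
  if List.lookup month_value month_value_dictionary = some "14" then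
    if (PySem.Int.mod year 4 = 0 ∧ PySem.Int.mod year 100 ≠ 0) ∨ PySem.Int.mod year 400 = 0 then 29 else 28
  else if (List.lookup month_value month_value_dictionary).elim false
            (fun v => v == "4" || v == "6" || v == "9" || v == "11") then 30
  else 31

-- one y-step of A's inner loop; state = (d, week_list)
def pvWeekStepA (last off : Int) (st : Int × List String) (y : Int) : Int × List String :=
  if st.1 > last then (st.1, st.2 ++ ["  "])
  else if st.1 = 1 then
    if off > y then (st.1, st.2 ++ ["  "])
    else if off = y then (st.1 + 1, st.2 ++ [" " ++ PySem.Int.toStr st.1])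
    else (st.1, st.2)
  else if st.1 < 10 then (st.1 + 1, st.2 ++ [" " ++ PySem.Int.toStr st.1])
  else (st.1 + 1, st.2 ++ [PySem.Int.toStr st.1])

-- A's two nested for-loops; outer state = (d, month_week_string)
def pvRowsA (off last : Int) : List String :=
  ((PySem.List.pyRange 0 6 1).foldl (fun (st : Int × List String) _x =>
      let inner := (PySem.List.pyRange 0 7 1).foldl (pvWeekStepA last off) (st.1, [" "])
      (inner.1, st.2 ++ [PySem.Str.join " " (inner.2 ++ [" "])]))
    (1, [])).2

def printing_dates (h_ : Int) (month_value : String) (year : Int) (j : Int) (month_value_dictionary : List (String × String)) : String :=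
  -- int(space_dictinary_for_one.get(h)); the .getD 0 arm is only reached outside Pre_ (TypeError in Python)
  let off := ((List.lookup h_ [((0:Int),"5"),(1,"6"),(2,"0"),(3,"1"),(4,"2"),(5,"3"),(6,"4")]).bind PySem.Int.ofStr?).getD 0
  let last := pvNoDaysA month_value_dictionary month_value year
  -- month_week_string[j-4]; the .getD "" arm is only reached outside Pre_ (IndexError in Python)
  (PySem.List.pyGet? (pvRowsA off last) (j - 4)).getD ""

-- ===== PORT B =====

-- B's flat build: 42 cell tokens by concatenation, then sliced into six rows of seven
def pvRowsB (off last : Int) : List String :=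
  let cells := List.replicate off.toNat "  " ++
    (PySem.List.pyRange 1 (last + 1) 1).map
      (fun d => if d < 10 then " " ++ PySem.Int.toStr d else PySem.Int.toStr d)
  let cells2 := cells ++ List.replicate (42 - cells.length) "  "
  (PySem.List.pyRange 0 42 7).map
    (fun i => PySem.Str.join " " ([" "] ++ PySem.List.slice cells2 (some i) (some (i + 7)) ++ [" "]))

def printing_dates_alt (h_ : Int) (month_value : String) (year : Int) (j : Int) (month_value_dictionary : List (String × String)) : String :=
  let v := List.lookup month_value month_value_dictionary
  let last : Int :=
    if v = some "14" then
      if (PySem.Int.mod year 4 = 0 ∧ PySem.Int.mod year 100 ≠ 0) ∨ PySem.Int.mod year 400 = 0 then 29 else 28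
    else if v.elim false (fun s => s == "4" || s == "6" || s == "9" || s == "11") then 30
    else 31
  let off := PySem.Int.mod (h_ + 5) 7
  -- rows[j-4]; the .getD "" arm is only reached outside Pre_ (IndexError in Python)
  (PySem.List.pyGet? (pvRowsB off last) (j - 4)).getD ""

-- ===== PRECONDITION & SPEC =====
-- Pre_ excludes exactly the inputs where Python A raises: h outside 0..6 (int(None) TypeError)
-- and j outside -2..9 (IndexError on month_week_string[j-4]).
def Pre_printing_dates (h_ : Int) (month_value : String) (year : Int) (j : Int) (month_value_dictionary : List (String × String)) : Prop :=
  0 ≤ h_ ∧ h_ ≤ 6 ∧ -2 ≤ j ∧ j ≤ 9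
instance (h_ : Int) (month_value : String) (year : Int) (j : Int) (month_value_dictionary : List (String × String)) : Decidable (Pre_printing_dates h_ month_value year j month_value_dictionary) := by unfold Pre_printing_dates; infer_instance

def pvWitness_printing_dates : Int × String × Int × Int × (List (String × String)) :=
  (0, "14", 2024, 4, [("14", "14")])

def Spec_printing_dates (h_ : Int) (month_value : String) (year : Int) (j : Int) (month_value_dictionary : List (String × String)) (out : String) : Prop := out = printing_dates_alt h_ month_value year j month_value_dictionary
instance (h_ : Int) (month_value : String) (year : Int) (j : Int) (month_value_dictionary : List (String × String)) (out : String) : Decidable (Spec_printing_dates h_ month_value year j month_value_dictionary out) := by unfold Spec_printing_dates; infer_instance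

-- ===== CLAIM (what is proved, stated in full; the proofs are below) =====
def Claim_equal_printing_dates : Prop := ∀ (h_ : Int) (month_value : String) (year : Int) (j : Int) (month_value_dictionary : List (String × String)), Dom_printing_dates h_ month_value year j month_value_dictionary → Pre_printing_dates h_ month_value year j month_value_dictionary → Spec_printing_dates h_ month_value year j month_value_dictionary (printing_dates h_ month_value year j month_value_dictionary)

-- ===== LEMMAS AND PROOFS =====

-- A's dictionary offset agrees with B's closed form (h+5) % 7 on 0..6
lemma pv_off_eq (h_ : Int) (h0 : 0 ≤ h_) (h6 : h_ ≤ 6) :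
    ((List.lookup h_ [((0:Int),"5"),(1,"6"),(2,"0"),(3,"1"),(4,"2"),(5,"3"),(6,"4")]).bind PySem.Int.ofStr?).getD 0
      = PySem.Int.mod (h_ + 5) 7 := by
  interval_cases h_ <;> decide

-- the month length is always one of 28,29,30,31
lemma pv_last_cases (mvd : List (String × String)) (mv : String) (yr : Int) :
    pvNoDaysA mvd mv yr = 28 ∨ pvNoDaysA mvd mv yr = 29 ∨
    pvNoDaysA mvd mv yr = 30 ∨ pvNoDaysA mvd mv yr = 31 := by
  unfold pvNoDaysA; split_ifs <;> simp

-- proof-side token views of the two row constructions (the join " " factored out)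
def pvTokA (off last : Int) : List (List String) :=
  ((PySem.List.pyRange 0 6 1).foldl (fun (st : Int × List (List String)) _x =>
      let inner := (PySem.List.pyRange 0 7 1).foldl (pvWeekStepA last off) (st.1, [" "])
      (inner.1, st.2 ++ [inner.2 ++ [" "]]))
    (1, [])).2

def pvTokB (off last : Int) : List (List String) :=
  let cells := List.replicate off.toNat "  " ++
    (PySem.List.pyRange 1 (last + 1) 1).map
      (fun d => if d < 10 then " " ++ PySem.Int.toStr d else PySem.Int.toStr d)
  let cells2 := cells ++ List.replicate (42 - cells.length) "  "
  (PySem.List.pyRange 0 42 7).map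
    (fun i => [" "] ++ PySem.List.slice cells2 (some i) (some (i + 7)) ++ [" "])

-- A's outer fold with the join factored out of the accumulator
lemma pv_foldA_factor (off last : Int) (l : List Int) (d : Int) (accT : List (List String)) :
    l.foldl (fun (st : Int × List String) _x =>
        let inner := (PySem.List.pyRange 0 7 1).foldl (pvWeekStepA last off) (st.1, [" "])
        (inner.1, st.2 ++ [PySem.Str.join " " (inner.2 ++ [" "])]))
      (d, accT.map (fun wl => PySem.Str.join " " wl))
    = ((l.foldl (fun (st : Int × List (List String)) _x =>
        let inner := (PySem.List.pyRange 0 7 1).foldl (pvWeekStepA last off) (st.1, [" "])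
        (inner.1, st.2 ++ [inner.2 ++ [" "]])) (d, accT)).1,
       ((l.foldl (fun (st : Int × List (List String)) _x =>
        let inner := (PySem.List.pyRange 0 7 1).foldl (pvWeekStepA last off) (st.1, [" "])
        (inner.1, st.2 ++ [inner.2 ++ [" "]])) (d, accT)).2).map (fun wl => PySem.Str.join " " wl)) := by
  induction l generalizing d accT with
  | nil => simp
  | cons x xs ih =>
    simp only [List.foldl_cons]
    have h := ih (((PySem.List.pyRange 0 7 1).foldl (pvWeekStepA last off) (d, [" "])).1)
      (accT ++ [((PySem.List.pyRange 0 7 1).foldl (pvWeekStepA last off) (d, [" "])).2 ++ [" "]])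
    simpa using h

lemma pv_rowsA_tok (off last : Int) :
    pvRowsA off last = (pvTokA off last).map (fun wl => PySem.Str.join " " wl) := by
  unfold pvRowsA pvTokA
  have h := pv_foldA_factor off last (PySem.List.pyRange 0 6 1) 1 []
  simpa using congrArg Prod.snd h

lemma pv_rowsB_tok (off last : Int) :
    pvRowsB off last = (pvTokB off last).map (fun wl => PySem.Str.join " " wl) := by
  unfold pvRowsB pvTokB
  rw [List.map_map]
  rfl

-- the two token grids agree for every reachable offset and month length
lemma pv_tok_all :
    (([0,1,2,3,4,5,6] : List Int).all fun off =>
      (([28,29,30,31] : List Int).all fun last => pvTokA off last == pvTokB off last)) = true := by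
  decide

lemma pv_rows_eq (off last : Int) (h0 : 0 ≤ off) (h6 : off ≤ 6)
    (hl : last = 28 ∨ last = 29 ∨ last = 30 ∨ last = 31) :
    pvRowsA off last = pvRowsB off last := by
  have hall := pv_tok_all
  simp only [List.all_eq_true, beq_iff_eq] at hall
  rw [pv_rowsA_tok, pv_rowsB_tok,
    hall off (by simp only [List.mem_cons, List.not_mem_nil, or_false]; omega)
      last (by simp only [List.mem_cons, List.not_mem_nil, or_false]; omega)]

-- ===== VERDICT (by name: the statement is the Claim_ definition above) =====
theorem printing_dates_spec : Claim_equal_printing_dates := by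
  intro h_ mv yr j mvd _dom pre
  obtain ⟨h0, h6, _, _⟩ := pre
  show printing_dates h_ mv yr j mvd = printing_dates_alt h_ mv yr j mvd
  have hlast : (if List.lookup mv mvd = some "14" then
      if (PySem.Int.mod yr 4 = 0 ∧ PySem.Int.mod yr 100 ≠ 0) ∨ PySem.Int.mod yr 400 = 0 then (29:Int) else 28
    else if (List.lookup mv mvd).elim false (fun s => s == "4" || s == "6" || s == "9" || s == "11") then 30
    else 31) = pvNoDaysA mvd mv yr := rfl
  simp only [printing_dates, printing_dates_alt, hlast,
    pv_off_eq h_ h0 h6, pv_rows_eq _ _ (by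
      have := PySem.Int.mod_nonneg (h_ + 5) (b := 7) (by norm_num); exact this) (by
      have := PySem.Int.mod_lt (h_ + 5) (b := 7) (by norm_num); omega)
      (pv_last_cases mvd mv yr)]
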